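-- pv_equiv track=rewrite | github.com/JawadMakhoul/Switch-Course | Matrix.py | undo_actions
-- ===== SOURCE A (Python) =====
-- def undo_actions(actions, undo_steps):
--     stack = actions[:]  # Copy the list to a stack
--
--     # Undo steps
--     for _ in range(undo_steps):
--         if stack:  # Check if the stack is not empty
--             stack.pop()  # Remove lst action
--         else:
--             break  # Stop if no more actions to undo
--
--     return stack
-- ===== SOURCE B (Python) =====
-- def undo_actions(actions, undo_steps):
--     keep = max(0, len(actions) - undo_steps)
--     return actions[:keep]
-- ===== Notes on version B (the rewrite author's own statement) =====
-- stated objective: simpler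
-- what changed: Replaces the copy-then-pop loop with a closed-form slice: keep = max(0, len(actions) - undo_steps) and return actions[:keep].
import Mathlib
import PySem

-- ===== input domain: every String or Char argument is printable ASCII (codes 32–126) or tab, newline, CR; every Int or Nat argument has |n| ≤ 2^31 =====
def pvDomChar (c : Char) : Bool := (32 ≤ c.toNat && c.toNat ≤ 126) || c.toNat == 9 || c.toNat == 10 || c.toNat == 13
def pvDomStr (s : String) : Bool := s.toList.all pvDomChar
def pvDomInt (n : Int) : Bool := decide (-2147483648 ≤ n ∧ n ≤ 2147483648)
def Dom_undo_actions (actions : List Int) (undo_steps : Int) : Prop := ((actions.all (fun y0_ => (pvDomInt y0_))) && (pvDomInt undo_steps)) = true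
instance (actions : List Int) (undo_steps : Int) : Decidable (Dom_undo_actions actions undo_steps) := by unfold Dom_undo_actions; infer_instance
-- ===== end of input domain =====

-- B replaces A's copy-then-pop loop with a closed-form slice of the kept prefix; return value only.
-- ===== PORT A =====
-- the for-loop over range(undo_steps): pop the last element while the stack is nonempty, break otherwise
def undoLoopA : Nat → List Int → List Int
  | 0, stack => stack
  | n + 1, stack => if stack ≠ [] then undoLoopA n stack.dropLast else stack

-- range(undo_steps) has undo_steps.toNat iterations (empty for negative undo_steps), exact
def undo_actions (actions : List Int) (undo_steps : Int) : List Int :=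
  undoLoopA undo_steps.toNat actions

-- ===== PORT B =====
def undo_actions_alt (actions : List Int) (undo_steps : Int) : List Int :=
  let keep : Int := max 0 ((actions.length : Int) - undo_steps)
  actions.take keep.toNat  -- actions[:keep] with keep ≥ 0 is take, exact

-- ===== PRECONDITION & SPEC =====
def Spec_undo_actions (actions : List Int) (undo_steps : Int) (out : List Int) : Prop := out = undo_actions_alt actions undo_steps
instance (actions : List Int) (undo_steps : Int) (out : List Int) : Decidable (Spec_undo_actions actions undo_steps out) := by unfold Spec_undo_actions; infer_instance

-- ===== CLAIM (what is proved, stated in full; the proofs are below) =====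
def Claim_equal_undo_actions : Prop := ∀ (actions : List Int) (undo_steps : Int), Dom_undo_actions actions undo_steps → Spec_undo_actions actions undo_steps (undo_actions actions undo_steps)

-- ===== LEMMAS AND PROOFS =====
theorem undoLoopA_eq_take (n : Nat) (s : List Int) :
    undoLoopA n s = s.take (s.length - n) := by
  induction n generalizing s with
  | zero => simp [undoLoopA]
  | succ n ih =>
    cases s with
    | nil => simp [undoLoopA]
    | cons a t =>
      simp only [undoLoopA, if_pos (List.cons_ne_nil a t)]
      rw [ih, List.dropLast_eq_take, List.take_take]
      congr 1
      simp only [List.length_take, List.length_cons]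
      omega

theorem take_clamp_eq (l : List Int) (u : Int) :
    l.take (l.length - u.toNat) = l.take (max 0 ((l.length : Int) - u)).toNat := by
  rcases le_total 0 ((l.length : Int) - u) with h | h
  · rw [max_eq_right h]
    rcases le_total 0 u with hu | hu
    · congr 1
      omega
    · rw [List.take_of_length_le (by omega), List.take_of_length_le (by omega)]
  · rw [max_eq_left h]
    congr 1
    omega

-- ===== VERDICT (by name: the statement is the Claim_ definition above) =====
theorem undo_actions_spec : Claim_equal_undo_actions := by
  intro actions undo_steps _
  unfold Spec_undo_actions undo_actions undo_actions_alt
  rw [undoLoopA_eq_take, take_clamp_eq]
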